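-- pv_equiv track=rewrite | github.com/esuyer/MAPython_2025 | L16.py | even_to_dot
-- ===== SOURCE A (Python) =====
-- def even_to_dot(S):
--    new_str = ""
--    for i in range(len(S)):
--       if i % 2 == 0:
--          new_str += '.'
--       else:
--          new_str += S[i]
--
--    return new_str
-- ===== SOURCE B (Python) =====
-- def even_to_dot(S):
--     lst = list(S)
--     lst[::2] = '.' * len(lst[::2])
--     return ''.join(lst)
-- ===== Notes on version B (the rewrite author's own statement) =====
-- stated objective: idiomatic
-- what changed: Replaces the per-index even/odd branch with repeated string concatenation by a single bulk stride-slice assignment of dots over a character list ('.'*count into lst[::2]) followed by one join.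
import Mathlib
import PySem

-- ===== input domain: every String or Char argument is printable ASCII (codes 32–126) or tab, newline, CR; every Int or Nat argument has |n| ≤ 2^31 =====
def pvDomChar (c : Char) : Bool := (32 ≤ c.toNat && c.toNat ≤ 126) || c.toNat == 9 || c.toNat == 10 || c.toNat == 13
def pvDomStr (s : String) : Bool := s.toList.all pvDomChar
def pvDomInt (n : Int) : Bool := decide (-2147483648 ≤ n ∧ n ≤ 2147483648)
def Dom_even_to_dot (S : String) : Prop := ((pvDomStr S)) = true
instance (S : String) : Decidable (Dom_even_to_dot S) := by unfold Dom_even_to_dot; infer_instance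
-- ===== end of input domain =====

-- B replaces A's per-index even/odd branch and string accumulation by one bulk
-- stride-2 slice assignment of dots into a character list, then a join (idiomatic).

-- ===== PORT A =====
-- for i in range(len(S)): if i % 2 == 0: new_str += '.' else: new_str += S[i]
-- (the .getD ' ' default is never used: i is always in range)
def even_to_dot (S : String) : String :=
  String.ofList <|
    (PySem.List.pyRange 0 (PySem.Str.len S) 1).foldl
      (fun acc i =>
        if PySem.Int.mod i 2 == 0 then acc ++ ['.']
        else acc ++ [(PySem.List.pyGet? S.toList i).getD ' '])
      []

-- ===== PORT B =====
-- model of the stride-2 slice assignment  lst[::2] = dots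
def pvSetStride2 : List Char → List Char → List Char
  | [], l => l
  | _ :: _, [] => []
  | d :: _, [_] => [d]
  | d :: ds, _ :: c :: rest => d :: c :: pvSetStride2 ds rest

-- lst = list(S); lst[::2] = '.' * len(lst[::2]); return ''.join(lst)
def even_to_dot_alt (S : String) : String :=
  String.ofList (pvSetStride2 (List.replicate ((S.toList.length + 1) / 2) '.') S.toList)

-- ===== PRECONDITION & SPEC =====
def Spec_even_to_dot (S : String) (out : String) : Prop := out = even_to_dot_alt S
instance (S : String) (out : String) : Decidable (Spec_even_to_dot S out) := by unfold Spec_even_to_dot; infer_instance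

-- ===== CLAIM (what is proved, stated in full; the proofs are below) =====
def Claim_equal_even_to_dot : Prop := ∀ (S : String), Dom_even_to_dot S → Spec_even_to_dot S (even_to_dot S)

-- ===== LEMMAS AND PROOFS =====

-- reference: alternate dots and original chars, flag = "current index is even"
def pvAlt : Bool → List Char → List Char
  | _, [] => []
  | true, _ :: cs => '.' :: pvAlt false cs
  | false, c :: cs => c :: pvAlt true cs

theorem pvB_eq : ∀ l : List Char,
    pvSetStride2 (List.replicate ((l.length + 1) / 2) '.') l = pvAlt true l
  | [] => rfl
  | [a] => by simp [pvSetStride2, pvAlt]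
  | a :: b :: t => by
    have ih := pvB_eq t
    have hlen : ((a :: b :: t).length + 1) / 2 = (t.length + 1) / 2 + 1 := by
      simp only [List.length_cons]; omega
    rw [hlen, List.replicate_succ]
    simp [pvSetStride2, pvAlt, ih]

theorem pvA_fold (chars : List Char) : ∀ (fuel k : Nat) (acc : List Char),
    chars.length = k + fuel →
    (PySem.List.pyRange (k : Int) (chars.length : Int) 1).foldl
      (fun acc i =>
        if PySem.Int.mod i 2 == 0 then acc ++ ['.']
        else acc ++ [(PySem.List.pyGet? chars i).getD ' '])
      acc
    = acc ++ pvAlt (k % 2 == 0) (chars.drop k) := by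
  intro fuel
  induction fuel with
  | zero =>
    intro k acc h
    rw [PySem.List.pyRange_one_eq_nil (by omega)]
    simp [List.drop_of_length_le (by omega : chars.length ≤ k), pvAlt]
  | succ n ih =>
    intro k acc h
    have hk : k < chars.length := by omega
    rw [PySem.List.pyRange_one_cons (by exact_mod_cast hk)]
    simp only [List.foldl_cons]
    have hmod : PySem.Int.mod (k : Int) 2 = ((k % 2 : Nat) : Int) := by
      exact_mod_cast PySem.Int.mod_natCast k 2
    have hget : PySem.List.pyGet? chars (k : Int) = some chars[k] := by
      simp [PySem.List.pyGet?_natCast, List.getElem?_eq_getElem hk]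
    have hdrop : chars.drop k = chars[k] :: chars.drop (k + 1) :=
      (List.getElem_cons_drop hk).symm
    have ih' := fun acc => ih (k + 1) acc (by omega)
    rw [show ((k : Int) + 1) = ((k + 1 : Nat) : Int) by push_cast; ring]
    rcases Nat.even_or_odd k with he | ho
    · have h2 : k % 2 = 0 := Nat.even_iff.mp he
      have h2' : (k + 1) % 2 = 1 := by omega
      rw [ih' _, hmod, h2, hdrop, h2', if_pos (by decide), List.append_assoc]
      rfl
    · have h2 : k % 2 = 1 := Nat.odd_iff.mp ho
      have h2' : (k + 1) % 2 = 0 := by omega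
      rw [ih' _, hmod, h2, hget, hdrop]
      simp only [Option.getD_some]
      rw [if_neg (by decide), List.append_assoc, h2']
      rfl

-- ===== VERDICT (by name: the statement is the Claim_ definition above) =====
theorem even_to_dot_spec : Claim_equal_even_to_dot := by
  intro S _
  unfold Spec_even_to_dot even_to_dot even_to_dot_alt
  rw [pvB_eq]
  have h := pvA_fold S.toList S.toList.length 0 [] (by omega)
  simp only [Nat.cast_zero] at h
  rw [PySem.Str.len_eq, h]
  rfl
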